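-- pv_equiv track=rewrite | github.com/MrBrantCode/unitest_baseline | mut_generate/mist_train_cf/cf_64190/solution.py | replace_the
-- ===== SOURCE A (Python) =====
-- def replace_the(text):
--     text = text.lower().split('\n')
--     for i in range(len(text)):
--         word_count = 0
--         line = text[i].split(' ')
--         for j in range(len(line)):
--             if line[j] == 'the':
--                 word_count += 1
--                 if word_count == 5:
--                     line[j] = '*'
--                     word_count = 0
--         text[i] = " ".join(line)
--     return "\n".join(text)
-- ===== SOURCE B (Python) =====
-- def replace_the(text):
--     def fix(line):
--         words = line.split(' ')
--         positions = [j for j, w in enumerate(words) if w == 'the']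
--         for k in range(4, len(positions), 5):
--             words[positions[k]] = '*'
--         return ' '.join(words)
--     return '\n'.join(fix(line) for line in text.lower().split('\n'))
-- ===== Notes on version B (the rewrite author's own statement) =====
-- stated objective: alternative
-- what changed: Per line, B first collects the indices of all 'the' words in one comprehension and then stars every 5th collected index with a stride-5 loop over the index list, instead of A's single fused loop with a reset-at-5 counter.
import Mathlib
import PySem

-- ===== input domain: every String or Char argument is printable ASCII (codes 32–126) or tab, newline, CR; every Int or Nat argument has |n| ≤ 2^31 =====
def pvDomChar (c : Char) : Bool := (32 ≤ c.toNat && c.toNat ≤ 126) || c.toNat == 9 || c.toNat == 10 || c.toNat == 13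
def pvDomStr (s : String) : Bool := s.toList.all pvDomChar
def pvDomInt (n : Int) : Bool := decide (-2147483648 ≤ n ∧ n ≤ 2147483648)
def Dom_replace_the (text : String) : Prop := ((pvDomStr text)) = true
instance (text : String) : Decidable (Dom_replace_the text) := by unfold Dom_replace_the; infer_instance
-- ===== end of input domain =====

-- B replaces A's fused reset-at-5 counter loop by a two-pass per-line scheme: first collect
-- the indices of 'the', then star every 5th collected index with a stride-5 loop.
-- Alternative decomposition, same complexity; return value only (neither program mutates
-- its argument).

-- ===== PORT A =====
-- inner loop of A: walks the word list with the word_count counter, starring the word when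
-- the counter reaches 5 and resetting it (the write at position j is never re-read by a
-- later iteration, so rebuilding the list structurally is exact)
def pvGoA : List String → Nat → List String
  | [], _ => []
  | w :: ws, c =>
    if w = "the" then
      if c + 1 = 5 then "*" :: pvGoA ws 0
      else w :: pvGoA ws (c + 1)
    else w :: pvGoA ws c

def replace_the (text : String) : String :=
  -- text = text.lower().split('\n')  (split? is always some here: the separator is nonempty)
  let lines := (PySem.Str.split? (PySem.Str.lower text) "\n").getD []
  PySem.Str.join "\n" (lines.map (fun li =>
    PySem.Str.join " " (pvGoA ((PySem.Str.split? li " ").getD []) 0)))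

-- ===== PORT B =====
-- positions = [j for j, w in enumerate(words) if w == 'the']
def pvPositions (ws : List String) : List Int :=
  (PySem.List.enumerate ws 0).filterMap (fun p => if p.2 = "the" then some p.1 else none)

-- for k in range(4, len(positions), 5): words[positions[k]] = '*'
-- (k is always in range, so positions[k] = pyGetD positions k 0, and the stored index is a
-- valid nonnegative index into words, so the assignment is List.set at its toNat; both exact)
def pvFixB (ws : List String) : List String :=
  let positions := pvPositions ws
  (PySem.List.pyRange 4 (PySem.List.len positions) 5).foldl
    (fun line k => line.set (PySem.List.pyGetD positions k 0).toNat "*") ws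

def replace_the_alt (text : String) : String :=
  PySem.Str.join "\n"
    (((PySem.Str.split? (PySem.Str.lower text) "\n").getD []).map (fun li =>
      PySem.Str.join " " (pvFixB ((PySem.Str.split? li " ").getD []))))

-- ===== PRECONDITION & SPEC =====
def Spec_replace_the (text : String) (out : String) : Prop := out = replace_the_alt text
instance (text : String) (out : String) : Decidable (Spec_replace_the text out) := by unfold Spec_replace_the; infer_instance

-- ===== CLAIM (what is proved, stated in full; the proofs are below) =====
def Claim_equal_replace_the : Prop := ∀ (text : String), Dom_replace_the text → Spec_replace_the text (replace_the text)

-- ===== LEMMAS AND PROOFS =====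

def pvMark : List String → Nat → List String
  | [], _ => []
  | w :: ws, t =>
    (if w = "the" then (if (t + 1) % 5 = 0 then "*" else w) else w)
      :: pvMark ws (if w = "the" then t + 1 else t)

def pvNatIdxs : List String → List Nat
  | [] => []
  | w :: ws => if w = "the" then 0 :: (pvNatIdxs ws).map (· + 1) else (pvNatIdxs ws).map (· + 1)

theorem pvGoA_eq_mark : ∀ (ws : List String) (c t : Nat), c < 5 → c = t % 5 →
    pvGoA ws c = pvMark ws t := by
  intro ws
  induction ws with
  | nil => intro c t _ _; rfl
  | cons w ws ih =>
    intro c t hc ht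
    by_cases hw : w = "the"
    · by_cases h5 : c + 1 = 5
      · have h5' : (t + 1) % 5 = 0 := by omega
        simp only [pvGoA, pvMark, hw, h5, h5', if_true, ite_true]
        exact congrArg _ (ih 0 (t+1) (by omega) (by omega))
      · have h5' : ¬ (t + 1) % 5 = 0 := by omega
        simp only [pvGoA, pvMark, hw, if_neg h5, if_neg h5', if_true, ite_true]
        exact congrArg _ (ih (c+1) (t+1) (by omega) (by omega))
    · simp only [pvGoA, pvMark, if_neg hw]
      exact congrArg _ (ih c t hc ht)

theorem pvPositions_aux : ∀ (ws : List String) (s : Int),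
    (PySem.List.enumerate ws s).filterMap (fun p => if p.2 = "the" then some p.1 else none)
      = (pvNatIdxs ws).map (fun (p : Nat) => s + (p : Int)) := by
  intro ws
  induction ws with
  | nil => intro s; simp [PySem.List.enumerate_nil, pvNatIdxs]
  | cons w ws ih =>
    intro s
    rw [PySem.List.enumerate_cons, List.filterMap_cons]
    by_cases hw : w = "the"
    all_goals (
      simp [hw, pvNatIdxs, ih, List.map_map]
      <;> (intro a _; push_cast; ring))

theorem pvFoldlSet_getElem? : ∀ (ks : List Int) (M : List Int) (ws : List String) (j : Nat),
    (ks.foldl (fun line k => line.set (PySem.List.pyGetD M k 0).toNat "*") ws)[j]?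
      = if j ∈ ks.map (fun k => (PySem.List.pyGetD M k 0).toNat)
        then (if j < ws.length then some "*" else none) else ws[j]? := by
  intro ks M
  induction ks with
  | nil => intro ws j; simp
  | cons k ks ih =>
    intro ws j
    rw [List.foldl_cons, ih]
    by_cases hm : j ∈ ks.map (fun k => (PySem.List.pyGetD M k 0).toNat)
    · simp [hm, List.mem_cons]
    · by_cases hk : j = (PySem.List.pyGetD M k 0).toNat
      · subst hk
        simp [hm, List.getElem?_set]
      · simp [hm, hk, List.getElem?_set, Ne.symm hk]

theorem pvMark_getElem? : ∀ (ws : List String) (t j : Nat),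
    (pvMark ws t)[j]?
      = (ws[j]?).map (fun w =>
          if w = "the" ∧ (t + (ws.take j).count "the" + 1) % 5 = 0 then "*" else w) := by
  intro ws
  induction ws with
  | nil => intro t j; simp [pvMark]
  | cons w ws ih =>
    intro t j
    cases j with
    | zero =>
      by_cases hw : w = "the" <;> simp [pvMark, hw]
    | succ j =>
      have hstep : (pvMark (w :: ws) t)[j+1]? = (pvMark ws (if w = "the" then t + 1 else t))[j]? := by
        simp [pvMark]
      have mapCong : ∀ (m n : Nat) (o : Option String), m = n →
          Option.map (fun x => if x = "the" ∧ m % 5 = 0 then "*" else x) o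
            = Option.map (fun x => if x = "the" ∧ n % 5 = 0 then "*" else x) o := by
        intro m n o h; rw [h]
      rw [hstep, ih]
      simp only [List.getElem?_cons_succ]
      apply mapCong
      by_cases hw : w = "the" <;>
        simp [hw, List.take_succ_cons, List.count_cons] <;> omega

theorem pvNatIdxs_getElem? : ∀ (ws : List String) (k j : Nat),
    (pvNatIdxs ws)[k]? = some j ↔ (ws[j]? = some "the" ∧ (ws.take j).count "the" = k) := by
  intro ws
  induction ws with
  | nil => intro k j; simp [pvNatIdxs]
  | cons w ws ih =>
    intro k j
    by_cases hw : w = "the"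
    · cases k with
      | zero =>
        cases j with
        | zero => simp [pvNatIdxs, hw]
        | succ j =>
          simp [pvNatIdxs, hw, List.take_succ_cons, List.count_cons]
      | succ k =>
        cases j with
        | zero => simp [pvNatIdxs, hw]
        | succ j =>
          simp only [pvNatIdxs, hw, ite_true, List.getElem?_cons_succ, List.getElem?_map,
            List.take_succ_cons, List.count_cons, Option.map_eq_some_iff]
          have hite : (if ("the" == "the") = true then 1 else 0) = 1 := by simp
          rw [hite]
          constructor
          · rintro ⟨a, ha, hej⟩
            obtain ⟨h1, h2⟩ := (ih k a).mp ha
            have haj : a = j := by omega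
            subst haj
            exact ⟨h1, by omega⟩
          · rintro ⟨h1, h2⟩
            exact ⟨j, (ih k j).mpr ⟨h1, by omega⟩, by omega⟩
    · cases j with
      | zero => simp [pvNatIdxs, hw]
      | succ j =>
        simp only [pvNatIdxs, hw, ite_false, List.getElem?_map, List.getElem?_cons_succ,
          List.take_succ_cons, List.count_cons, Option.map_eq_some_iff]
        have hite : (if (w == "the") = true then 1 else 0) = 0 := by simp [hw]
        rw [hite, add_zero]
        constructor
        · rintro ⟨a, ha, hej⟩
          obtain ⟨h1, h2⟩ := (ih k a).mp ha
          have haj : a = j := by omega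
          subst haj
          exact ⟨h1, h2⟩
        · rintro ⟨h1, h2⟩
          exact ⟨j, (ih k j).mpr ⟨h1, h2⟩, rfl⟩

theorem pvFixB_eq_mark (ws : List String) : pvFixB ws = pvMark ws 0 := by
  have hpos : pvPositions ws = (pvNatIdxs ws).map (fun (p : Nat) => (p : Int)) := by
    unfold pvPositions
    rw [pvPositions_aux]
    apply List.map_congr_left; intro a _; simp
  have hfix : pvFixB ws = (PySem.List.pyRange 4 (PySem.List.len (pvPositions ws)) 5).foldl
      (fun line k => line.set (PySem.List.pyGetD (pvPositions ws) k 0).toNat "*") ws := rfl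
  rw [hfix, hpos]
  set L := pvNatIdxs ws with hL
  set M := L.map (fun (p : Nat) => (p : Int)) with hM
  have hlen : PySem.List.len M = (L.length : Int) := by
    simp [PySem.List.len, hM]
  have hmem : ∀ j : Nat,
      j ∈ (PySem.List.pyRange 4 (PySem.List.len M) 5).map
          (fun k => (PySem.List.pyGetD M k 0).toNat)
        ↔ (ws[j]? = some "the" ∧ (ws.take j).count "the" % 5 = 4) := by
    intro j
    rw [List.mem_map]
    constructor
    · rintro ⟨kI, hkI, hf⟩
      rw [PySem.List.mem_pyRange_iff_of_pos (by norm_num), hlen] at hkI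
      obtain ⟨h4, hn, hdvd⟩ := hkI
      have hk : kI.toNat < L.length := by omega
      have hk5 : kI.toNat % 5 = 4 := by omega
      rw [PySem.List.pyGetD_of_nonneg _ _ (by omega), hM] at hf
      rw [List.getD_eq_getElem?_getD, List.getElem?_map,
        List.getElem?_eq_getElem hk] at hf
      simp only [Option.map_some, Option.getD_some, Int.toNat_natCast] at hf
      have hchar := (pvNatIdxs_getElem? ws kI.toNat (L[kI.toNat])).mp
        (List.getElem?_eq_getElem hk)
      rw [hf] at hchar
      exact ⟨hchar.1, by omega⟩
    · rintro ⟨h1, h2⟩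
      have hidx := (pvNatIdxs_getElem? ws ((ws.take j).count "the") j).mpr ⟨h1, rfl⟩
      have hk : (ws.take j).count "the" < L.length :=
        (List.getElem?_eq_some_iff.mp hidx).1
      refine ⟨((ws.take j).count "the" : Int), ?_, ?_⟩
      · rw [PySem.List.mem_pyRange_iff_of_pos (by norm_num), hlen]
        refine ⟨by omega, by omega, by omega⟩
      · rw [PySem.List.pyGetD_of_nonneg _ _ (by omega), hM]
        rw [List.getD_eq_getElem?_getD, List.getElem?_map, Int.toNat_natCast, hidx]
        rfl
  apply List.ext_getElem?
  intro j
  rw [pvFoldlSet_getElem?, pvMark_getElem?]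
  cases hj : ws[j]? with
  | none =>
    have hge : ¬ j < ws.length := by
      intro hlt
      rw [List.getElem?_eq_getElem hlt] at hj
      simp at hj
    split_ifs <;> simp [hj]
  | some w =>
    have hlt : j < ws.length := (List.getElem?_eq_some_iff.mp hj).1
    by_cases hcond : w = "the" ∧ ((ws.take j).count "the") % 5 = 4
    · have hm := (hmem j).mpr ⟨by rw [hj, hcond.1], hcond.2⟩
      rw [if_pos hm, if_pos hlt]
      have hc2 : (0 + (ws.take j).count "the" + 1) % 5 = 0 := by omega
      simp only [Option.map_some]
      rw [if_pos ⟨hcond.1, hc2⟩]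
    · have hm : ¬ j ∈ (PySem.List.pyRange 4 (PySem.List.len M) 5).map
          (fun k => (PySem.List.pyGetD M k 0).toNat) := by
        intro hmm
        obtain ⟨h1, h2⟩ := (hmem j).mp hmm
        rw [hj] at h1
        exact hcond ⟨Option.some.inj h1, h2⟩
      have hc2 : ¬ (w = "the" ∧ (0 + (ws.take j).count "the" + 1) % 5 = 0) := by
        intro hb; exact hcond ⟨hb.1, by omega⟩
      rw [if_neg hm]
      simp only [Option.map_some]
      rw [if_neg hc2]

-- ===== VERDICT (by name: the statement is the Claim_ definition above) =====
theorem replace_the_spec : Claim_equal_replace_the := by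
  intro text _
  show replace_the text = replace_the_alt text
  simp only [replace_the, replace_the_alt]
  apply congrArg (PySem.Str.join "\n")
  apply List.map_congr_left
  intro li _
  rw [pvFixB_eq_mark, pvGoA_eq_mark _ 0 0 (by omega) rfl]
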